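-- pv_equiv track=rewrite | github.com/pypi-data/pypi-mirror-314 | packages/iker-python-common/iker_python_common-1.0.11-py3-none-any.whl/iker/common/utils/strutils.py | strip_margin
-- ===== SOURCE A (Python) =====
-- def strip_margin(text: str, margin_char: str = "|") -> str:
--     stripped_text = ""
--     last_stripped_line = ""
--     for lineno, line in enumerate(text.splitlines()):
--         stripped_line = line.lstrip()
--         if stripped_line.startswith(margin_char):
--             stripped_line = stripped_line[len(margin_char):]
--         if len(stripped_line) == 0:
--             if lineno > 0:
--                 stripped_text += "\n"
--         elif len(last_stripped_line) > 0:
--             stripped_text += " " + stripped_line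
--         else:
--             stripped_text += stripped_line
--         last_stripped_line = stripped_line
--     return stripped_text
-- ===== SOURCE B (Python) =====
-- def strip_margin(text: str, margin_char: str = "|") -> str:
--     # two-phase: strip all lines first, then emit per run (group) of equal emptiness
--     stripped = []
--     for line in text.splitlines():
--         s = line.lstrip()
--         if s.startswith(margin_char):
--             s = s[len(margin_char):]
--         stripped.append(s)
--     pieces = []
--     i = 0
--     while i < len(stripped):
--         j = i
--         if stripped[i] == "":
--             while j < len(stripped) and stripped[j] == "":
--                 j += 1
--             n = j - i
--             if i == 0:
--                 n -= 1
--             pieces.append("\n" * n)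
--         else:
--             while j < len(stripped) and stripped[j] != "":
--                 j += 1
--             pieces.append(" ".join(stripped[i:j]))
--         i = j
--     return "".join(pieces)
-- ===== Notes on version B (the rewrite author's own statement) =====
-- stated objective: alternative
-- what changed: Replaced A's single stateful per-line loop (accumulating a string while tracking the previous stripped line) by a two-phase pass: first strip every line, then emit one piece per run of consecutive empty/nonempty stripped lines (space-join a nonempty run, n newlines for an empty run, n-1 for a leading one).
import Mathlib
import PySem

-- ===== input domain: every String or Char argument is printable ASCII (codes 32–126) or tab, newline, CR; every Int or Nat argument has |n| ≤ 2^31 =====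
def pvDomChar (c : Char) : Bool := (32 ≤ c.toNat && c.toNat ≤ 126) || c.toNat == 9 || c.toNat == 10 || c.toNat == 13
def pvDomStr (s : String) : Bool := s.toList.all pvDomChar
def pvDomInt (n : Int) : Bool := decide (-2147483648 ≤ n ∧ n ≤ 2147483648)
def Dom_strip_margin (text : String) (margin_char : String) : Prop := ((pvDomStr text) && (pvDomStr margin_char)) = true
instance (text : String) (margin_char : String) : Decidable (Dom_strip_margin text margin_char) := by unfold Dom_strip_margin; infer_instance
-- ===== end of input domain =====

-- B replaces A's single stateful per-line loop by a two-phase pass: strip all lines first,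
-- then emit once per RUN of empty/nonempty stripped lines (objective: alternative decomposition).

-- ===== PORT A =====
-- shared line-stripping step: lstrip, then drop a leading margin_char prefix
def pvStrip (margin_char : String) (line : String) : String :=
  let s := PySem.Str.lstrip line
  if PySem.Str.startswith s margin_char then
    PySem.Str.slice s (some (PySem.Str.len margin_char)) none
  else s

-- the body of A's for-loop; state = (stripped_text, last_stripped_line)
def pvStepA (margin_char : String) (st : String × String) (p : Int × String) : String × String :=
  let stripped_line := pvStrip margin_char p.2
  if PySem.Str.len stripped_line = 0 then
    (if 0 < p.1 then st.1 ++ "\n" else st.1, stripped_line)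
  else if 0 < PySem.Str.len st.2 then
    (st.1 ++ " " ++ stripped_line, stripped_line)
  else
    (st.1 ++ stripped_line, stripped_line)

def strip_margin (text : String) (margin_char : String) : String :=
  ((PySem.List.enumerate (PySem.Str.splitlines text)).foldl (pvStepA margin_char) ("", "")).1

-- ===== PORT B =====
-- Source B's while loop over the stripped lines: one piece per run of equal emptiness;
-- the inner `while j < len … j += 1` scans are the takeWhile/dropWhile splits.
def pvRuns (first : Bool) : List String → String
  | [] => ""
  | s :: rest =>
    if s == "" then
      let n := (rest.takeWhile (· == "")).length + 1 - (if first then 1 else 0)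
      String.ofList (List.replicate n '\n') ++ pvRuns false (rest.dropWhile (· == ""))
    else
      PySem.Str.join " " (s :: rest.takeWhile (fun t => !(t == ""))) ++
        pvRuns false (rest.dropWhile (fun t => !(t == "")))
termination_by l => l.length
decreasing_by
  · exact Nat.lt_succ_of_le (List.length_dropWhile_le _ _)
  · exact Nat.lt_succ_of_le (List.length_dropWhile_le _ _)

def strip_margin_alt (text : String) (margin_char : String) : String :=
  pvRuns true ((PySem.Str.splitlines text).map (pvStrip margin_char))

-- ===== PRECONDITION & SPEC =====
def Spec_strip_margin (text : String) (margin_char : String) (out : String) : Prop := out = strip_margin_alt text margin_char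
instance (text : String) (margin_char : String) (out : String) : Decidable (Spec_strip_margin text margin_char out) := by unfold Spec_strip_margin; infer_instance

-- ===== CLAIM (what is proved, stated in full; the proofs are below) =====
def Claim_equal_strip_margin : Prop := ∀ (text : String) (margin_char : String), Dom_strip_margin text margin_char → Spec_strip_margin text margin_char (strip_margin text margin_char)

-- ===== LEMMAS AND PROOFS =====

-- A's loop after the first line, as structural recursion (last = last_stripped_line; lines already stripped)
def pvAux (last : String) : List String → String
  | [] => ""
  | s :: rest =>
    (if PySem.Str.len s = 0 then "\n"
     else if 0 < PySem.Str.len last then " " ++ s else s) ++ pvAux s rest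

theorem pv_len_zero_iff (s : String) : PySem.Str.len s = 0 ↔ s = "" := by
  rw [PySem.Str.len_eq]
  simp [← String.toList_eq_nil_iff]

theorem pv_len_pos_iff (s : String) : 0 < PySem.Str.len s ↔ s ≠ "" := by
  rw [PySem.Str.len_eq]
  constructor
  · intro hp he; subst he; simp at hp
  · intro hn
    have h1 : s.toList ≠ [] := fun hh => hn (String.toList_eq_nil_iff.mp hh)
    have h2 : 0 < s.toList.length := List.length_pos_iff.mpr h1
    exact_mod_cast h2

theorem pv_runs_peel (rest : List String) :
    pvRuns false rest =
      String.ofList (List.replicate ((rest.takeWhile (· == "")).length) '\n') ++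
        pvRuns false (rest.dropWhile (· == "")) := by
  cases rest with
  | nil => simp [pvRuns]
  | cons s r =>
    by_cases hs : s = ""
    · subst hs; rw [pvRuns]; simp
    · rw [List.takeWhile_cons, List.dropWhile_cons]; simp [hs]

theorem pv_runs_empty_cons (rest : List String) :
    pvRuns false ("" :: rest) = "\n" ++ pvRuns false rest := by
  rw [pvRuns, pv_runs_peel rest]
  rw [← String.append_assoc]
  simp [List.replicate_succ]
  rw [show ('\n' :: List.replicate ((List.takeWhile (fun x => x == "") rest).length) '\n')
        = ['\n'] ++ List.replicate ((List.takeWhile (fun x => x == "") rest).length) '\n' from rfl,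
      ← String.ofList_append]

theorem pv_runs_first_empty (rest : List String) :
    pvRuns true ("" :: rest) = pvRuns false rest := by
  rw [pvRuns, pv_runs_peel rest]
  simp

theorem pv_runs_first_nonempty (s : String) (rest : List String) (hs : s ≠ "") :
    pvRuns true (s :: rest) = pvRuns false (s :: rest) := by
  rw [pvRuns, pvRuns]
  simp [hs]

theorem pv_join_cons_cons (s t : String) (l : List String) :
    PySem.Str.join " " (s :: t :: l) = s ++ " " ++ PySem.Str.join " " (t :: l) := by
  apply String.toList_injective
  simp [PySem.Str.toList_join, PySem.Chars.join_cons_cons]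

theorem pv_runs_cons_cons (s t : String) (rest : List String) (hs : s ≠ "") (ht : t ≠ "") :
    pvRuns false (s :: t :: rest) = s ++ " " ++ pvRuns false (t :: rest) := by
  rw [pvRuns, pvRuns]
  simp only [List.takeWhile_cons, List.dropWhile_cons]
  simp [hs, ht, pv_join_cons_cons, String.append_assoc]

theorem pv_runs_single (s : String) (rest : List String) (hs : s ≠ "") (h : rest.headD "" = "") :
    pvRuns false (s :: rest) = s ++ pvRuns false rest := by
  cases rest with
  | nil =>
    rw [pvRuns]
    simp [hs, pvRuns, PySem.Str.join]
  | cons t r =>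
    have ht : t = "" := by simpa using h
    subst ht
    rw [pvRuns]
    simp [hs, PySem.Str.join]

theorem pv_main (ls : List String) (last : String) :
    pvAux last ls =
      if 0 < PySem.Str.len last ∧ ls.headD "" ≠ "" then " " ++ pvRuns false ls
      else pvRuns false ls := by
  induction ls generalizing last with
  | nil => simp [pvAux, pvRuns]
  | cons s rest ih =>
    rw [pvAux, ih s]
    by_cases hs : s = ""
    · subst hs
      simp only [pv_len_zero_iff, pv_len_pos_iff]
      simp [pv_runs_empty_cons]
    · by_cases hr : rest.headD "" = ""
      · simp only [pv_len_zero_iff, pv_len_pos_iff]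
        simp only [hs, hr, ite_false]
        rw [pv_runs_single s rest hs hr]
        by_cases hl : last = "" <;> simp [hs, hl, String.append_assoc]
      · obtain ⟨t, r, rfl⟩ : ∃ t r, rest = t :: r := by
          cases rest with
          | nil => simp at hr
          | cons t r => exact ⟨t, r, rfl⟩
        have ht : t ≠ "" := by simpa using hr
        simp only [pv_len_zero_iff, pv_len_pos_iff]
        rw [pv_runs_cons_cons s t r hs ht]
        by_cases hl : last = "" <;> simp [hs, ht, hl, String.append_assoc]

theorem pv_foldA (mc : String) (xs : List String) (k : Int) (acc last : String) (hk : 1 ≤ k) :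
    ((PySem.List.enumerate xs k).foldl (pvStepA mc) (acc, last)).1 =
      acc ++ pvAux last (xs.map (pvStrip mc)) := by
  induction xs generalizing k acc last with
  | nil => simp [pvAux, PySem.List.enumerate_nil]
  | cons x xs ih =>
    rw [PySem.List.enumerate_cons, List.foldl_cons, List.map_cons, pvAux]
    have hk0 : (0 : Int) < k := by omega
    by_cases hx : pvStrip mc x = ""
    · have hstep : pvStepA mc (acc, last) (k, x) = (acc ++ "\n", pvStrip mc x) := by
        simp [pvStepA, hx, hk0]
      rw [hstep, ih (k + 1) _ _ (by omega), if_pos ((pv_len_zero_iff _).mpr hx),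
        String.append_assoc]
    · have hlen : ¬ PySem.Str.len (pvStrip mc x) = 0 := fun hh => hx ((pv_len_zero_iff _).mp hh)
      by_cases hl : last = ""
      · have hnp : ¬ 0 < PySem.Str.len last := by simp [hl, PySem.Str.len_eq]
        have hstep : pvStepA mc (acc, last) (k, x) = (acc ++ pvStrip mc x, pvStrip mc x) := by
          simp [pvStepA, hx, hl]
        rw [hstep, ih (k + 1) _ _ (by omega), if_neg hlen, if_neg hnp, String.append_assoc]
      · have hp : 0 < PySem.Str.len last := (pv_len_pos_iff last).mpr hl
        have hlp : 0 < last.length := by simpa [PySem.Str.len_eq] using hp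
        have hstep : pvStepA mc (acc, last) (k, x) = (acc ++ " " ++ pvStrip mc x, pvStrip mc x) := by
          simp [pvStepA, hx, hlp]
        rw [hstep, ih (k + 1) _ _ (by omega), if_neg hlen, if_pos hp]
        simp [String.append_assoc]

-- ===== VERDICT (by name: the statement is the Claim_ definition above) =====
theorem strip_margin_spec : Claim_equal_strip_margin := by
  intro text mc _
  unfold Spec_strip_margin strip_margin strip_margin_alt
  cases h : PySem.Str.splitlines text with
  | nil => simp [PySem.List.enumerate_nil, pvRuns]
  | cons x xs =>
    rw [PySem.List.enumerate_cons, List.foldl_cons, List.map_cons]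
    by_cases hx : pvStrip mc x = ""
    · have hstep : pvStepA mc ("", "") ((0 : Int), x) = ("", pvStrip mc x) := by
        simp [pvStepA, hx]
      rw [hstep, pv_foldA mc xs (0 + 1) "" (pvStrip mc x) (by omega), String.empty_append,
        pv_main, hx]
      simp [pv_runs_first_empty]
    · have hstep : pvStepA mc ("", "") ((0 : Int), x) = (pvStrip mc x, pvStrip mc x) := by
        simp [pvStepA, hx]
      rw [hstep, pv_foldA mc xs (0 + 1) _ _ (by omega), pv_main]
      rw [pv_runs_first_nonempty _ _ hx]
      by_cases hr : (xs.map (pvStrip mc)).headD "" = ""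
      · rw [if_neg (fun hcond => hcond.2 hr), pv_runs_single _ _ hx hr]
      · obtain ⟨t, r, hrw⟩ : ∃ t r, xs.map (pvStrip mc) = t :: r := by
          cases hm : xs.map (pvStrip mc) with
          | nil => rw [hm] at hr; simp at hr
          | cons t r => exact ⟨t, r, rfl⟩
        have ht : t ≠ "" := by rw [hrw] at hr; simpa using hr
        rw [hrw, if_pos ⟨(pv_len_pos_iff _).mpr hx, by simpa using ht⟩]
        rw [pv_runs_cons_cons _ _ _ hx ht, String.append_assoc]
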